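-- pv_equiv track=rewrite | github.com/nathanfourniol/AdventOfCode | python2023/day2.py | findMaxColorByGame
-- ===== SOURCE A (Python) =====
-- def findMaxColorByGame(list_of_tries):
--     blue = [0]
--     green = [0]
--     red = [0]
--     for trie in list_of_tries:
--         red.append(trie[0])
--         green.append(trie[1])
--         blue.append(trie[2])
--     max_red = max(red)
--     max_green = max(green)
--     max_blue = max(blue)
--     return max_red, max_green, max_blue
-- ===== SOURCE B (Python) =====
-- def findMaxColorByGame(list_of_tries):
--     max_red = max_green = max_blue = 0
--     for trie in list_of_tries:
--         if trie[0] > max_red: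
--             max_red = trie[0]
--         if trie[1] > max_green:
--             max_green = trie[1]
--         if trie[2] > max_blue:
--             max_blue = trie[2]
--     return max_red, max_green, max_blue
-- ===== Notes on version B (the rewrite author's own statement) =====
-- stated objective: simpler
-- what changed: Instead of materializing three lists seeded with 0 and scanning each with max(), B keeps three running maxima in one pass and never builds any list.
import Mathlib
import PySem

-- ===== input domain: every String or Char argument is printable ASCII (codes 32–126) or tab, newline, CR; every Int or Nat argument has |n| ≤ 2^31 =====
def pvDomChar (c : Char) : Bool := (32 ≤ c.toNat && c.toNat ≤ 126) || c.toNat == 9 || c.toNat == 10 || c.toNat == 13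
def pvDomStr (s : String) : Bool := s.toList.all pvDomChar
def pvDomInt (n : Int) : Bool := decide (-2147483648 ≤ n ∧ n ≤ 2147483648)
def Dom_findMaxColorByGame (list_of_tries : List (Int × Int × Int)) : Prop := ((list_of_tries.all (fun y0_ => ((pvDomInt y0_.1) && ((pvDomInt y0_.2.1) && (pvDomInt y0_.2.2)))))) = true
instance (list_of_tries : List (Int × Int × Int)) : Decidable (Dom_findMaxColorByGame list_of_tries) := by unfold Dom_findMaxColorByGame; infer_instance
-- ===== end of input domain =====

-- B replaces A's three materialized lists (each seeded with 0) and max() scans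
-- by a single pass keeping three running maxima; same return value, simpler.

-- ===== PORT A =====
-- Python's max() over a nonempty list, taken as first element then folded with max
def pyMaxNE (xs : List Int) : Int :=
  match xs with
  | [] => 0  -- unreachable: A's lists are seeded with 0
  | x :: rest => rest.foldl max x

def findMaxColorByGame (list_of_tries : List (Int × Int × Int)) : Int × Int × Int :=
  let lists := list_of_tries.foldl
    (fun (acc : List Int × List Int × List Int) (trie : Int × Int × Int) =>
      (acc.1 ++ [trie.1], acc.2.1 ++ [trie.2.1], acc.2.2 ++ [trie.2.2]))
    ([0], [0], [0])
  (pyMaxNE lists.1, pyMaxNE lists.2.1, pyMaxNE lists.2.2)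

-- ===== PORT B =====
def findMaxColorByGame_alt (list_of_tries : List (Int × Int × Int)) : Int × Int × Int :=
  list_of_tries.foldl
    (fun (m : Int × Int × Int) (trie : Int × Int × Int) =>
      (if trie.1 > m.1 then trie.1 else m.1,
       if trie.2.1 > m.2.1 then trie.2.1 else m.2.1,
       if trie.2.2 > m.2.2 then trie.2.2 else m.2.2))
    (0, 0, 0)

-- ===== PRECONDITION & SPEC =====
def Spec_findMaxColorByGame (list_of_tries : List (Int × Int × Int)) (out : Int × Int × Int) : Prop := out = findMaxColorByGame_alt list_of_tries
instance (list_of_tries : List (Int × Int × Int)) (out : Int × Int × Int) : Decidable (Spec_findMaxColorByGame list_of_tries out) := by unfold Spec_findMaxColorByGame; infer_instance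

-- ===== CLAIM (what is proved, stated in full; the proofs are below) =====
def Claim_equal_findMaxColorByGame : Prop := ∀ (list_of_tries : List (Int × Int × Int)), Dom_findMaxColorByGame list_of_tries → Spec_findMaxColorByGame list_of_tries (findMaxColorByGame list_of_tries)

-- ===== LEMMAS AND PROOFS =====

-- A's loop appends each component to its list
theorem loopA_eq (l : List (Int × Int × Int)) (r g b : List Int) :
    l.foldl
      (fun (acc : List Int × List Int × List Int) (trie : Int × Int × Int) =>
        (acc.1 ++ [trie.1], acc.2.1 ++ [trie.2.1], acc.2.2 ++ [trie.2.2]))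
      (r, g, b)
    = (r ++ l.map (·.1), g ++ l.map (·.2.1), b ++ l.map (·.2.2)) := by
  induction l generalizing r g b with
  | nil => simp
  | cons t rest ih => simp [List.foldl_cons, ih]

-- B's loop computes the three component folds independently
theorem loopB_eq (l : List (Int × Int × Int)) (mr mg mb : Int) :
    l.foldl
      (fun (m : Int × Int × Int) (trie : Int × Int × Int) =>
        (if trie.1 > m.1 then trie.1 else m.1,
         if trie.2.1 > m.2.1 then trie.2.1 else m.2.1,
         if trie.2.2 > m.2.2 then trie.2.2 else m.2.2))
      (mr, mg, mb)
    = (l.foldl (fun a t => max a t.1) mr,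
       l.foldl (fun a t => max a t.2.1) mg,
       l.foldl (fun a t => max a t.2.2) mb) := by
  induction l generalizing mr mg mb with
  | nil => simp
  | cons t rest ih =>
      simp only [List.foldl_cons, ih]
      congr 1 <;> [skip; congr 1] <;> congr 1 <;> omega

theorem pyMaxNE_zero_cons (xs : List Int) : pyMaxNE (0 :: xs) = xs.foldl max 0 := rfl

-- ===== VERDICT (by name: the statement is the Claim_ definition above) =====
theorem findMaxColorByGame_spec : Claim_equal_findMaxColorByGame := by
  intro l _
  show findMaxColorByGame l = findMaxColorByGame_alt l
  unfold findMaxColorByGame findMaxColorByGame_alt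
  rw [loopA_eq, loopB_eq]
  simp [pyMaxNE_zero_cons, List.foldl_map]
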